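-- pv_equiv track=rewrite | github.com/kiboook/Programmers | Programmers/NumGame.py | solution
-- ===== SOURCE A (Python) =====
-- def solution(A, B):
--     answer = 0
--
--     A.sort()
--     B.sort()
--
--     for i in A:
--     	for j in B:
--     		if i < j:
--     			B.remove(j)
--     			answer += 1
--     			break
--
--
--     return answer
-- ===== SOURCE B (Python) =====
-- def solution(A, B):
--     # Greedy sweep over sorted B with a single index into sorted A (O(n log n));
--     # return value only: unlike A, this does not mutate A or B in place.
--     # Each b (in increasing order) beats the smallest still-unbeaten element of A
--     # if it can; this greedy matching has the same size as A's scan-and-remove.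
--     As = sorted(A)
--     count = 0
--     for b in sorted(B):
--         if count < len(As) and As[count] < b:
--             count += 1
--     return count
-- ===== Notes on version B (the rewrite author's own statement) =====
-- stated objective: faster
-- what changed: Replaces the quadratic scan-and-remove inner loop over B with one linear sweep over sorted B advancing a single index into sorted A; B does not mutate its arguments (return value is identical).
import Mathlib
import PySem

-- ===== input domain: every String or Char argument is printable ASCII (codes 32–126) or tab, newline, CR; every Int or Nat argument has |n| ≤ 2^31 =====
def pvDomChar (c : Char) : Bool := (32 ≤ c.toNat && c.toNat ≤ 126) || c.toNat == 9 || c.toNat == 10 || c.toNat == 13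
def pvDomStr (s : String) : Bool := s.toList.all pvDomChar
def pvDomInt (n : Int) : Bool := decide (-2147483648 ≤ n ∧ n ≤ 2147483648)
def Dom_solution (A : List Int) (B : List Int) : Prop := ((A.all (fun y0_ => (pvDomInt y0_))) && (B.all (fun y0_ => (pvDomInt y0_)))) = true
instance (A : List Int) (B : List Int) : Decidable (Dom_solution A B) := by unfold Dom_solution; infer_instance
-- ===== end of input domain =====

-- B replaces A's quadratic scan-and-remove over B with one sweep of sorted B advancing
-- a single index into sorted A (objective: faster); equivalence is about the RETURN
-- value only — A sorts A and B and removes matched elements from B in place, B does not mutate.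

-- ===== PORT A =====
-- outer 'for i in A' loop; inner 'for j in B: if i < j: B.remove(j); answer += 1; break'
def outerA : List Int → List Int → Int → Int
  | [], _, answer => answer
  | i :: rest, B, answer =>
      match B.find? (fun j => decide (i < j)) with
      | some j => outerA rest ((PySem.List.remove? B j).getD B) (answer + 1)
      | none => outerA rest B answer

def solution (A : List Int) (B : List Int) : Int :=
  outerA (PySem.List.sorted A (fun x => x) false) (PySem.List.sorted B (fun x => x) false) 0

-- ===== PORT B =====
-- 'for b in sorted(B): if count < len(As) and As[count] < b: count += 1'
def solution_alt (A : List Int) (B : List Int) : Int :=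
  let As := PySem.List.sorted A (fun x => x) false
  (PySem.List.sorted B (fun x => x) false).foldl
    (fun count b =>
      if count < (As.length : Int) ∧ (PySem.List.pyGet? As count).getD 0 < b then count + 1
      else count) 0

-- ===== PRECONDITION & SPEC =====
def Spec_solution (A : List Int) (B : List Int) (out : Int) : Prop := out = solution_alt A B
instance (A : List Int) (B : List Int) (out : Int) : Decidable (Spec_solution A B out) := by unfold Spec_solution; infer_instance

-- ===== CLAIM (what is proved, stated in full; the proofs are below) =====
def Claim_equal_solution : Prop := ∀ (A : List Int) (B : List Int), Dom_solution A B → Spec_solution A B (solution A B)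

-- ===== LEMMAS AND PROOFS =====

-- proof-only intermediary: two-pointer recursion both loops reduce to
def twoPtr : List Int → List Int → Int
  | [], _ => 0
  | a :: as, bs =>
      match bs.dropWhile (fun b => decide (b ≤ a)) with
      | [] => 0
      | _ :: rest => 1 + twoPtr as rest

-- an element b that no remaining i of A can beat never affects the outer loop
theorem outerA_skip_le (b : Int) (A : List Int) (hA : ∀ a ∈ A, b ≤ a) :
    ∀ (bs : List Int) (ans : Int), outerA A (b :: bs) ans = outerA A bs ans := by
  induction A with
  | nil => intro bs ans; rfl
  | cons a as ih =>
      intro bs ans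
      have hba : b ≤ a := hA a (by simp)
      have hfind : (b :: bs).find? (fun j => decide (a < j)) = bs.find? (fun j => decide (a < j)) := by
        simp [show ¬ a < b by omega]
      have htail : ∀ a' ∈ as, b ≤ a' := fun a' h => hA a' (by simp [h])
      cases hf : bs.find? (fun j => decide (a < j)) with
      | none => simp [outerA, hfind, hf, ih htail]
      | some j =>
          have hj : a < j := by
            have := List.find?_some hf; simpa using this
          have hjb : b ≠ j := by omega
          have hjm : j ∈ bs := List.mem_of_find?_eq_some hf
          obtain ⟨bs', hbs'⟩ : ∃ bs', PySem.List.remove? bs j = some bs' :=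
            ⟨bs.erase j, PySem.List.remove?_eq_some_erase _ _ hjm⟩
          have hrem : PySem.List.remove? (b :: bs) j = some (b :: bs') := by
            rw [PySem.List.remove?_cons_of_ne _ hjb, hbs']; rfl
          simp only [outerA, hfind, hf, hrem, hbs', Option.getD_some]
          exact ih htail _ _

-- with B exhausted, the outer loop never matches anything
theorem outerA_nil : ∀ (A : List Int) (ans : Int), outerA A [] ans = ans := by
  intro A
  induction A with
  | nil => intro ans; rfl
  | cons x xs ihx => intro ans; simpa [outerA] using ihx ans

-- A's loop on sorted lists equals the two-pointer recursion
theorem outerA_eq_twoPtr : ∀ (n : Nat) (A B : List Int) (ans : Int),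
    A.length + B.length ≤ n →
    A.Pairwise (· ≤ ·) → B.Pairwise (· ≤ ·) →
    outerA A B ans = ans + twoPtr A B := by
  intro n
  induction n with
  | zero =>
      intro A B ans hn _ _
      have : A = [] := by cases A <;> simp_all
      subst this; simp [outerA, twoPtr]
  | succ n ih =>
      intro A B ans hn hA hB
      cases A with
      | nil => simp [outerA, twoPtr]
      | cons a as =>
          cases B with
          | nil =>
              simp [outerA_nil, twoPtr]
          | cons b bs =>
              by_cases hba : b ≤ a
              · have hAge : ∀ x ∈ a :: as, b ≤ x := by
                  intro x hx
                  rcases List.mem_cons.mp hx with h | h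
                  · omega
                  · have := (List.pairwise_cons.mp hA).1 x h; omega
                rw [outerA_skip_le b (a :: as) hAge bs ans]
                have hdrop : (b :: bs).dropWhile (fun x => decide (x ≤ a)) =
                    bs.dropWhile (fun x => decide (x ≤ a)) := by
                  simp [List.dropWhile, hba]
                have h2 : twoPtr (a :: as) (b :: bs) = twoPtr (a :: as) bs := by
                  simp only [twoPtr, hdrop]
                rw [h2]
                exact ih (a :: as) bs ans (by simp at hn ⊢; omega) hA (List.Pairwise.of_cons hB)
              · have hab : a < b := by omega
                have hfind : (b :: bs).find? (fun j => decide (a < j)) = some b := by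
                  simp [hab]
                have hrem : PySem.List.remove? (b :: bs) b = some bs :=
                  PySem.List.remove?_cons_self _ _
                have hdrop : (b :: bs).dropWhile (fun x => decide (x ≤ a)) = b :: bs := by
                  simp [List.dropWhile, show ¬ b ≤ a by omega]
                have hL : outerA (a :: as) (b :: bs) ans = outerA as bs (ans + 1) := by
                  simp [outerA, hfind, hrem]
                have hR : twoPtr (a :: as) (b :: bs) = 1 + twoPtr as bs := by
                  simp only [twoPtr, hdrop]
                rw [hL, hR,
                  ih as bs (ans + 1) (by simp at hn ⊢; omega)
                    (List.Pairwise.of_cons hA) (List.Pairwise.of_cons hB)]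
                ring

-- twoPtr of any first list and empty second list is 0
theorem twoPtr_nil_right : ∀ (A : List Int), twoPtr A [] = 0 := by
  intro A; cases A <;> simp [twoPtr, List.dropWhile]

-- B's fold, started at index k, equals k + a two-pointer run on the suffix of As
theorem foldB_eq_twoPtr (As : List Int) : ∀ (bs : List Int) (k : Nat),
    bs.foldl
      (fun count b =>
        if count < (As.length : Int) ∧ (PySem.List.pyGet? As count).getD 0 < b then count + 1
        else count) (k : Int)
    = (k : Int) + twoPtr (As.drop k) bs := by
  intro bs
  induction bs with
  | nil => intro k; simp [twoPtr_nil_right]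
  | cons b bs ih =>
      intro k
      by_cases hk : k < As.length
      · have hdropk : As.drop k = As[k] :: As.drop (k + 1) :=
          List.drop_eq_getElem_cons hk
        have hget : (PySem.List.pyGet? As (k : Int)).getD 0 = As[k] := by
          simp [PySem.List.pyGet?_natCast, List.getElem?_eq_getElem hk]
        by_cases hab : As[k] < b
        · have hcond : ((k : Int) < (As.length : Int) ∧
              (PySem.List.pyGet? As (k : Int)).getD 0 < b) := by
            constructor
            · exact_mod_cast hk
            · rw [hget]; exact hab
          have hdw : (b :: bs).dropWhile (fun x => decide (x ≤ As[k])) = b :: bs := by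
            simp [List.dropWhile, show ¬ b ≤ As[k] by omega]
          have hR : twoPtr (As.drop k) (b :: bs) = 1 + twoPtr (As.drop (k + 1)) bs := by
            rw [hdropk]; simp only [twoPtr, hdw]
          have : ((k : Int) + 1) = ((k + 1 : Nat) : Int) := by push_cast; ring
          simp only [List.foldl_cons, if_pos hcond, this, ih (k + 1), hR]
          push_cast; ring
        · have hcond : ¬ ((k : Int) < (As.length : Int) ∧
              (PySem.List.pyGet? As (k : Int)).getD 0 < b) := by
            rw [hget]; intro h; exact hab h.2
          have hdw : (b :: bs).dropWhile (fun x => decide (x ≤ As[k])) =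
              bs.dropWhile (fun x => decide (x ≤ As[k])) := by
            simp [List.dropWhile, show b ≤ As[k] by omega]
          have hR : twoPtr (As.drop k) (b :: bs) = twoPtr (As.drop k) bs := by
            rw [hdropk]; simp only [twoPtr, hdw]
          simp only [List.foldl_cons, if_neg hcond, ih k, hR]
      · have hdropk : As.drop k = [] := List.drop_eq_nil_of_le (by omega)
        have hcond : ¬ ((k : Int) < (As.length : Int) ∧
            (PySem.List.pyGet? As (k : Int)).getD 0 < b) := by
          intro h; exact hk (by exact_mod_cast h.1)
        simp only [List.foldl_cons, if_neg hcond, ih k, hdropk, twoPtr]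

-- ===== VERDICT (by name: the statement is the Claim_ definition above) =====
theorem solution_spec : Claim_equal_solution := by
  intro A B _
  unfold Spec_solution solution solution_alt
  have hA := outerA_eq_twoPtr
    ((PySem.List.sorted A (fun x => x) false).length + (PySem.List.sorted B (fun x => x) false).length)
    (PySem.List.sorted A (fun x => x) false) (PySem.List.sorted B (fun x => x) false) 0
    le_rfl (PySem.List.sorted_pairwise A (fun x => x)) (PySem.List.sorted_pairwise B (fun x => x))
  have hB := foldB_eq_twoPtr (PySem.List.sorted A (fun x => x) false)
    (PySem.List.sorted B (fun x => x) false) 0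
  simp only [Nat.cast_zero, List.drop_zero, zero_add] at hA hB
  rw [hA]
  exact hB.symm
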